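-- pv_equiv track=rewrite | github.com/pinosante/VAM-Evolutionary-Character-Creation | ecc/common/utility.py | strip_dir_string_to_max_length
-- ===== SOURCE A (Python) =====
-- def strip_dir_string_to_max_length(dir_string, length):
--     """ Takes a string directory, and cuts it at the '/' in the string such that the
--         length of the stripped string is as large as possible but stays smaller than
--         the total 'length'. A '(…)/' is added if the string had to be cut.
--
--         Example:
--         strip_dir_string_to_max_length("C:/456/890/234.txt", 99)
--         >C:/456/890/234.txt
--         strip_dir_string_to_max_length("C:/456/890/234.txt", 15)
--         >(…)/890/234.txt
--         strip_dir_string_to_max_length("C:/456/890/234.txt", 14)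
--         >(…)/234.txt
--         """
--     if len(dir_string) <= length:
--         return dir_string
--     parts = dir_string.split("\\")
--     stripped_string = ""
--     index = len(parts) - 1
--     while (len(parts[index]) + 1) <= ((length - 4) - (len(stripped_string) - 1)):
--         if index == -1:
--             break
--         stripped_string = parts[index] + "\\" + stripped_string
--         index -= 1
--     stripped_string = stripped_string[:-1]  # remove trailing "\"
--     return "(…)\\" + stripped_string
-- ===== SOURCE B (Python) =====
-- def strip_dir_string_to_max_length(dir_string, length):
--     if len(dir_string) <= length:
--         return dir_string
--     # earliest separator whose suffix (of length len - cut - 1) fits in length - 4 chars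
--     start = max(len(dir_string) - (length - 3), 0)
--     cut = dir_string.find("\\", start)
--     if cut == -1:
--         return "(…)\\"
--     return "(…)\\" + dir_string[cut + 1:]
-- ===== Notes on version B (the rewrite author's own statement) =====
-- stated objective: simpler
-- what changed: Instead of splitting the path into parts and greedily re-accumulating trailing parts in a backwards while loop, B computes the cut position arithmetically: the first backslash at or after index len - (length - 3) is exactly the earliest separator whose suffix fits, so one str.find plus one slice replaces the whole split/loop/join machinery.
import Mathlib
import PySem

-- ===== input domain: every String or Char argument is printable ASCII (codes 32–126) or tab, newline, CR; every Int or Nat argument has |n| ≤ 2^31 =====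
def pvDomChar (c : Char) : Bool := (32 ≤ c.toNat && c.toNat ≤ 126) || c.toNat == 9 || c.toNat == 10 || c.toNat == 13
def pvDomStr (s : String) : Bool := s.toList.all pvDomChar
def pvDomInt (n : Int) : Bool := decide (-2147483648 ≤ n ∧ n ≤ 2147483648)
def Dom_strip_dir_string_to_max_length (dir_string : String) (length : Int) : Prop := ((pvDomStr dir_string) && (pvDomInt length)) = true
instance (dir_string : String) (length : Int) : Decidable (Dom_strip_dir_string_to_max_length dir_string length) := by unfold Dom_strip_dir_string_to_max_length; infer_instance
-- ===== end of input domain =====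

-- B replaces A's split-into-parts greedy accumulation loop by pure index arithmetic:
-- one str.find for the earliest separator whose suffix fits, then a single slice — objective: simpler.

-- ===== PORT A =====
-- A's while loop. `idx` is Python's `index + 1`, so `idx = 0` is Python's `index == -1`:
-- there Python evaluates the condition once more on the wrapped `parts[-1]` (which always
-- exists, since split never returns an empty list) and then breaks whether it held or not,
-- so the loop result is `stripped` either way — transcribed as the `0` case.
def pvA_loop (parts : List (List Char)) (length : Int) : Nat → List Char → List Char
  | 0, stripped => stripped
  | i + 1, stripped =>
    let part := parts.getD i []
    if ((part.length : Int) + 1) ≤ ((length - 4) - ((stripped.length : Int) - 1)) then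
      pvA_loop parts length i (part ++ '\\' :: stripped)
    else stripped

def strip_dir_string_to_max_length (dir_string : String) (length : Int) : String :=
  if ((PySem.Str.len dir_string : Int)) ≤ length then dir_string
  else
    let parts := PySem.Chars.splitOn dir_string.toList ['\\']
    let stripped := pvA_loop parts length parts.length []
    String.mk (['(', '…', ')', '\\'] ++ PySem.List.slice stripped none (some (-1)))

-- ===== PORT B =====
-- B: start = max(len - (length-3), 0); cut = dir_string.find("\\", start); slice after the cut.
def strip_dir_string_to_max_length_alt (dir_string : String) (length : Int) : String :=
  if ((PySem.Str.len dir_string : Int)) ≤ length then dir_string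
  else
    let cs := dir_string.toList
    let start : Int := max ((PySem.Str.len dir_string : Int) - (length - 3)) 0
    let cut := PySem.Chars.findFrom cs ['\\'] start
    if cut = -1 then "(…)\\"
    else String.mk (['(', '…', ')', '\\'] ++ PySem.List.slice cs (some (cut + 1)) none)

-- ===== PRECONDITION & SPEC =====
def Spec_strip_dir_string_to_max_length (dir_string : String) (length : Int) (out : String) : Prop := out = strip_dir_string_to_max_length_alt dir_string length
instance (dir_string : String) (length : Int) (out : String) : Decidable (Spec_strip_dir_string_to_max_length dir_string length out) := by unfold Spec_strip_dir_string_to_max_length; infer_instance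

-- ===== CLAIM (what is proved, stated in full; the proofs are below) =====
def Claim_equal_strip_dir_string_to_max_length : Prop := ∀ (dir_string : String) (length : Int), Dom_strip_dir_string_to_max_length dir_string length → Spec_strip_dir_string_to_max_length dir_string length (strip_dir_string_to_max_length dir_string length)

-- ===== LEMMAS AND PROOFS =====

-- ---- A-side loop lemmas (A's while loop characterized as a greedy fold) ----

-- A's loop with index range `n ≤ xs.length` never looks past `xs`.
theorem pvA_loop_append (ys : List (List Char)) (length : Int) :
    ∀ (n : Nat) (xs : List (List Char)) (s : List Char), n ≤ xs.length →
    pvA_loop (xs ++ ys) length n s = pvA_loop xs length n s := by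
  intro n
  induction n with
  | zero => intro xs s _; rfl
  | succ i ih =>
    intro xs s hn
    simp only [pvA_loop]
    rw [List.getD_append _ _ _ _ (by omega)]
    split
    · exact ih xs _ (by omega)
    · rfl

-- total cost of a kept block: Σ (len + 1)
def pvCost (acc : List (List Char)) : Int := (acc.map (fun p => (p.length : Int) + 1)).sum

theorem pvCost_nil : pvCost [] = 0 := rfl

theorem pvCost_concat (acc : List (List Char)) (p : List Char) :
    pvCost (acc ++ [p]) = pvCost acc + ((p.length : Int) + 1) := by
  simp [pvCost]

def pvFlat (acc : List (List Char)) : List Char :=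
  (acc.reverse.map (fun p => p ++ ['\\'])).flatten

theorem pvFlat_length (acc : List (List Char)) : (pvFlat acc).length = pvCost acc := by
  induction acc with
  | nil => rfl
  | cons a tl ih =>
    simp only [pvFlat, pvCost, List.reverse_cons, List.map_append, List.flatten_append,
      List.length_append, List.map_cons, List.map_nil, List.flatten_cons, List.flatten_nil,
      List.sum_cons] at *
    push_cast
    simp at ih ⊢
    omega

theorem pvFlat_concat (acc : List (List Char)) (p : List Char) :
    pvFlat (acc ++ [p]) = (p ++ ['\\']) ++ pvFlat acc := by
  simp [pvFlat]

-- greedy reference loop (proof-side only): consume parts from the end while they fit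
def pvGreedyLoop : Int → List (List Char) → List (List Char) → List (List Char)
  | _, [], kept => kept
  | budget, p :: rest, kept =>
    if ((p.length : Int) + 1) > budget then kept
    else pvGreedyLoop (budget - ((p.length : Int) + 1)) rest (kept ++ [p])

-- the bridge: A's loop run over `rp.reverse` from the top equals the greedy loop consuming `rp`
theorem pv_main (length : Int) :
    ∀ (rp acc : List (List Char)),
    pvA_loop rp.reverse length rp.reverse.length (pvFlat acc)
      = pvFlat (pvGreedyLoop (length - 3 - pvCost acc) rp acc) := by
  intro rp
  induction rp with
  | nil => intro acc; rfl
  | cons p rest ih =>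
    intro acc
    have hlen : (p :: rest).reverse = rest.reverse ++ [p] := by simp
    rw [hlen]
    have hL : (rest.reverse ++ [p]).length = rest.reverse.length + 1 := by simp
    rw [hL]
    simp only [pvA_loop]
    rw [List.getD_append_right _ _ _ _ (le_refl _)]
    simp only [Nat.sub_self, List.getD_cons_zero]
    rw [pvFlat_length]
    simp only [pvGreedyLoop]
    by_cases hc : ((p.length : Int) + 1) ≤ length - 3 - pvCost acc
    · rw [if_pos (by omega), if_neg (by omega)]
      have : p ++ '\\' :: pvFlat acc = pvFlat (acc ++ [p]) := by
        rw [pvFlat_concat]; simp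
      rw [this, pvA_loop_append [p] length rest.reverse.length rest.reverse (pvFlat (acc ++ [p])) (le_refl _)]
      rw [ih (acc ++ [p])]
      rw [pvCost_concat, sub_add_eq_sub_sub]
    · rw [if_neg (by omega), if_pos (by omega)]

-- chopping the trailing '\' off A's accumulated string is exactly a join
theorem pv_dropLast_join :
    ∀ (kept : List (List Char)),
    ((kept.map (fun p => p ++ ['\\'])).flatten).dropLast = PySem.Chars.join ['\\'] kept := by
  intro kept
  induction kept with
  | nil => simp [PySem.Chars.join_nil]
  | cons a tl ih =>
    cases tl with
    | nil => simp [PySem.Chars.join_singleton]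
    | cons b r =>
      have hne : ((List.map (fun p => p ++ ['\\']) (b :: r)).flatten) ≠ [] := by
        simp [List.flatten_cons]
      rw [List.map_cons, List.flatten_cons, List.dropLast_append_of_ne_nil hne, ih,
        PySem.Chars.join_cons_cons]

-- ---- find/split/greedy bridging lemmas ----

theorem pv_single_prefix (a : Char) (l : List Char) : [a] <+: l ↔ l.head? = some a := by
  cases l with
  | nil => simp
  | cons b t => simp [List.cons_prefix_cons, eq_comm]

theorem pv_find_bsfree (q : List Char) (h : '\\' ∉ q) : PySem.Chars.find q ['\\'] = -1 := by
  rw [PySem.Chars.find_eq_neg_one_iff]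
  intro hinf
  exact h (hinf.subset (by simp))

theorem pv_find_split (q t : List Char) (h : '\\' ∉ q) :
    PySem.Chars.find (q ++ '\\' :: t) ['\\'] = (q.length : Int) := by
  have hinf : ['\\'] <:+: q ++ '\\' :: t := ⟨q, t, by simp⟩
  have hnn : 0 ≤ PySem.Chars.find (q ++ '\\' :: t) ['\\'] :=
    (PySem.Chars.find_nonneg_iff _ _).mpr hinf
  obtain ⟨hpre, hmin⟩ := PySem.Chars.find_spec hnn
  have hjq : (PySem.Chars.find (q ++ '\\' :: t) ['\\']).toNat = q.length := by
    set j := (PySem.Chars.find (q ++ '\\' :: t) ['\\']).toNat with hj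
    rcases lt_trichotomy j q.length with hlt | heq | hgt
    · exfalso
      rw [pv_single_prefix, List.head?_drop, List.getElem?_append_left hlt] at hpre
      have : q[j]'hlt = '\\' := by
        have := List.getElem?_eq_getElem hlt
        rw [this] at hpre
        exact Option.some_inj.mp hpre
      exact h (this ▸ List.getElem_mem hlt)
    · exact heq
    · exact absurd ((pv_single_prefix _ _).mpr (by
        rw [List.head?_drop, List.getElem?_append_right (le_refl _)]
        simp)) (hmin q.length hgt)
  omega

theorem pv_findFrom_past (s : List Char) (st : Int) (h : (s.length : Int) < st) :
    PySem.Chars.findFrom s ['\\'] st = -1 := by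
  have h0 : ¬ st < 0 := by omega
  simp only [PySem.Chars.findFrom, h0, if_false, if_pos h]

theorem pv_findFrom_bsfree (s : List Char) (st : Int) (h : '\\' ∉ s) (h0 : 0 ≤ st) :
    PySem.Chars.findFrom s ['\\'] st = -1 := by
  by_cases hle : st ≤ (s.length : Int)
  · have hk : st = ((st.toNat : Nat) : Int) := (Int.toNat_of_nonneg h0).symm
    rw [hk, PySem.Chars.findFrom_natCast _ _ _ (by omega)]
    rw [pv_find_bsfree _ (fun hm => h ((List.drop_subset _ _) hm))]
    simp
  · exact pv_findFrom_past _ _ (by omega)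

theorem pv_findFrom_split (p t : List Char) (st : Int) (h : '\\' ∉ p)
    (h0 : 0 ≤ st) (hle : st ≤ (p.length : Int)) :
    PySem.Chars.findFrom (p ++ '\\' :: t) ['\\'] st = (p.length : Int) := by
  have hk : st = ((st.toNat : Nat) : Int) := (Int.toNat_of_nonneg h0).symm
  have hkp : st.toNat ≤ p.length := by omega
  rw [hk, PySem.Chars.findFrom_natCast _ _ _ (by simp; omega)]
  rw [List.drop_append_of_le_length hkp]
  rw [pv_find_split _ _ (fun hm => h ((List.drop_subset _ _) hm))]
  rw [if_neg (by simp)]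
  simp [List.length_drop]
  omega

theorem pv_findFrom_shift (p t : List Char) (st : Int) (hge : (p.length : Int) + 1 ≤ st) :
    PySem.Chars.findFrom (p ++ '\\' :: t) ['\\'] st =
      (if PySem.Chars.findFrom t ['\\'] (st - (p.length + 1)) = -1 then -1
       else PySem.Chars.findFrom t ['\\'] (st - (p.length + 1)) + (p.length + 1)) := by
  by_cases hle : st ≤ ((p ++ '\\' :: t).length : Int)
  · have h0 : 0 ≤ st := by omega
    have hk : st = ((st.toNat : Nat) : Int) := (Int.toNat_of_nonneg h0).symm
    have hk' : ((st.toNat : Nat) : Int) - ((p.length : Int) + 1) = (((st.toNat - (p.length + 1) : Nat)) : Int) := by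
      have : p.length + 1 ≤ st.toNat := by omega
      omega
    have hlen : st.toNat ≤ (p ++ '\\' :: t).length := by simp at hle ⊢; omega
    have hlen' : st.toNat - (p.length + 1) ≤ t.length := by simp at hle; omega
    rw [hk, hk', PySem.Chars.findFrom_natCast _ _ _ hlen, PySem.Chars.findFrom_natCast _ _ _ hlen']
    have hdrop : (p ++ '\\' :: t).drop st.toNat = t.drop (st.toNat - (p.length + 1)) := by
      rw [List.drop_append, List.drop_eq_nil_of_le (by omega : p.length ≤ st.toNat)]
      rw [show st.toNat - p.length = (st.toNat - (p.length + 1)) + 1 by omega]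
      simp
    rw [hdrop]
    have hge0 := PySem.Chars.neg_one_le_find (t.drop (st.toNat - (p.length + 1))) ['\\']
    by_cases hf : PySem.Chars.find (t.drop (st.toNat - (p.length + 1))) ['\\'] = -1
    · simp [hf]
    · simp only [if_neg hf]
      rw [if_neg (by omega)]
      omega
  · rw [pv_findFrom_past _ _ (by omega)]
    rw [pv_findFrom_past t _ (by simp at hle ⊢; omega)]
    simp

def pvSplit : List Char → List (List Char)
  | [] => [[]]
  | c :: rest =>
    if c = '\\' then [] :: pvSplit rest
    else (c :: (pvSplit rest).headI) :: (pvSplit rest).tail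

theorem pvSplit_ne_nil (s : List Char) : pvSplit s ≠ [] := by
  cases s with
  | nil => simp [pvSplit]
  | cons c rest => simp only [pvSplit]; split <;> simp

theorem pv_go_spec (s : List Char) :
    ∀ (fuel : Nat) (cur : List Char) (acc : List (List Char)), s.length < fuel →
    PySem.Chars.splitOn.go ['\\'] fuel s cur acc =
      acc.reverse ++ (cur.reverse ++ (pvSplit s).headI) :: (pvSplit s).tail := by
  induction s with
  | nil =>
    intro fuel cur acc hf
    match fuel with
    | f + 1 => simp [PySem.Chars.splitOn.go, pvSplit]
  | cons c rest ih =>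
    intro fuel cur acc hf
    match fuel with
    | f + 1 =>
      simp only [PySem.Chars.splitOn.go]
      by_cases hc : c = '\\'
      · rw [if_pos (by simp [hc])]
        rw [show List.drop (['\\'] : List Char).length (c :: rest) = rest by simp]
        rw [ih f [] (cur.reverse :: acc) (by simpa using hf)]
        obtain ⟨h0, t0, hht⟩ := List.exists_cons_of_ne_nil (pvSplit_ne_nil rest)
        simp [pvSplit, hc, hht]
      · rw [if_neg (by simp [List.isPrefixOf]; exact fun h => hc h.symm)]
        rw [ih f (c :: cur) acc (by simpa using hf)]
        simp [pvSplit, hc]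

theorem pv_splitOn_eq (s : List Char) :
    PySem.Chars.splitOn s ['\\'] = pvSplit s := by
  rw [PySem.Chars.splitOn, pv_go_spec s (s.length + 1) [] [] (by omega)]
  obtain ⟨h, t, hht⟩ : ∃ h t, pvSplit s = h :: t :=
    List.exists_cons_of_ne_nil (pvSplit_ne_nil s)
  simp [hht]

theorem pv_join_pvSplit (s : List Char) : PySem.Chars.join ['\\'] (pvSplit s) = s := by
  induction s with
  | nil => simp [pvSplit, PySem.Chars.join_singleton]
  | cons c rest ih =>
    obtain ⟨h0, t0, hht⟩ := List.exists_cons_of_ne_nil (pvSplit_ne_nil rest)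
    by_cases hc : c = '\\'
    · rw [show pvSplit (c :: rest) = [] :: pvSplit rest by simp [pvSplit, hc]]
      rw [hht, PySem.Chars.join_cons_cons, ← hht, ih]
      simp [hc]
    · rw [show pvSplit (c :: rest) = (c :: (pvSplit rest).headI) :: (pvSplit rest).tail by
        simp [pvSplit, hc]]
      rw [hht] at ih ⊢
      cases t0 with
      | nil => simpa [PySem.Chars.join_singleton] using congrArg (c :: ·) ih
      | cons q t1 =>
        rw [PySem.Chars.join_cons_cons] at ih
        simp only [List.headI, List.tail]
        rw [PySem.Chars.join_cons_cons, ← ih]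
        simp

theorem pv_pvSplit_free (s : List Char) : ∀ p ∈ pvSplit s, '\\' ∉ p := by
  induction s with
  | nil => simp [pvSplit]
  | cons c rest ih =>
    obtain ⟨h0, t0, hht⟩ := List.exists_cons_of_ne_nil (pvSplit_ne_nil rest)
    by_cases hc : c = '\\'
    · rw [show pvSplit (c :: rest) = [] :: pvSplit rest by simp [pvSplit, hc]]
      intro p hp
      rcases hp with _ | hp
      · simp
      · exact ih p (by assumption)
    · rw [show pvSplit (c :: rest) = (c :: (pvSplit rest).headI) :: (pvSplit rest).tail by
        simp [pvSplit, hc]]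
      intro p hp
      rcases hp with _ | hp
      · intro hm
        rcases List.mem_cons.mp hm with h1 | h1
        · exact hc h1.symm
        · exact ih (pvSplit rest).headI (by rw [hht]; simp [List.headI]) h1
      · exact ih p (by rw [hht] at *; exact List.mem_cons_of_mem _ (by assumption))


-- ---- greedy-loop structure lemmas ----

theorem pvCost_nonneg (xs : List (List Char)) : 0 ≤ pvCost xs := by
  apply List.sum_nonneg
  intro x hx
  simp only [List.mem_map] at hx
  obtain ⟨p, _, rfl⟩ := hx
  positivity

theorem pvCost_reverse (xs : List (List Char)) : pvCost xs.reverse = pvCost xs := by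
  simp [pvCost, List.map_reverse, List.sum_reverse]

theorem pvGL_all : ∀ (xs ys acc : List (List Char)) (b : Int), pvCost xs ≤ b →
    pvGreedyLoop b (xs ++ ys) acc = pvGreedyLoop (b - pvCost xs) ys (acc ++ xs) := by
  intro xs
  induction xs with
  | nil => intro ys acc b _; simp [pvCost_nil]
  | cons p r ih =>
    intro ys acc b hb
    have hr := pvCost_nonneg r
    have hcost : pvCost (p :: r) = ((p.length : Int) + 1) + pvCost r := by simp [pvCost]
    simp only [List.cons_append, pvGreedyLoop]
    rw [if_neg (by omega)]
    rw [ih ys (acc ++ [p]) _ (by omega)]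
    rw [List.append_assoc]
    simp only [List.singleton_append]
    congr 1
    omega

theorem pvGL_neg : ∀ (ys acc : List (List Char)) (b : Int), b < 1 →
    pvGreedyLoop b ys acc = acc := by
  intro ys
  induction ys with
  | nil => intro acc b _; rfl
  | cons p r _ =>
    intro acc b hb
    simp only [pvGreedyLoop]
    rw [if_pos (by omega)]

theorem pvGL_stop : ∀ (xs ys acc : List (List Char)) (b : Int), b < pvCost xs →
    pvGreedyLoop b (xs ++ ys) acc = pvGreedyLoop b xs acc := by
  intro xs
  induction xs with
  | nil =>
    intro ys acc b hb
    rw [pvCost_nil] at hb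
    simp only [List.nil_append, pvGreedyLoop]
    exact pvGL_neg ys acc b (by omega)
  | cons p r ih =>
    intro ys acc b hb
    have hcost : pvCost (p :: r) = ((p.length : Int) + 1) + pvCost r := by simp [pvCost]
    simp only [List.cons_append, pvGreedyLoop]
    by_cases hp : ((p.length : Int) + 1) > b
    · rw [if_pos hp, if_pos hp]
    · rw [if_neg hp, if_neg hp]
      exact ih ys (acc ++ [p]) _ (by omega)

theorem pvCost_join : ∀ (ps : List (List Char)), ps ≠ [] →
    pvCost ps = ((PySem.Chars.join ['\\'] ps).length : Int) + 1 := by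
  intro ps
  induction ps with
  | nil => intro h; exact absurd rfl h
  | cons p q ih =>
    intro _
    cases q with
    | nil =>
      rw [PySem.Chars.join_singleton]
      simp [pvCost]
    | cons r t =>
      have hcost : pvCost (p :: r :: t) = ((p.length : Int) + 1) + pvCost (r :: t) := by
        simp [pvCost]
      rw [hcost, ih (by simp), PySem.Chars.join_cons_cons]
      push_cast [List.length_append, List.length_cons, List.length_nil]
      omega

-- B's tail computation: find the first separator at or after `len - (L - 3)`, slice after it
def pvBTail (cs : List Char) (L : Int) : List Char :=
  let start : Int := max ((cs.length : Int) - (L - 3)) 0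
  let cut := PySem.Chars.findFrom cs ['\\'] start
  if cut = -1 then [] else cs.drop (cut.toNat + 1)

theorem pv_findFrom_nonneg (s : List Char) (st : Int) (h0 : 0 ≤ st)
    (hne : PySem.Chars.findFrom s ['\\'] st ≠ -1) : 0 ≤ PySem.Chars.findFrom s ['\\'] st := by
  by_cases hle : st ≤ (s.length : Int)
  · have hk : st = ((st.toNat : Nat) : Int) := (Int.toNat_of_nonneg h0).symm
    rw [hk, PySem.Chars.findFrom_natCast _ _ _ (by omega)] at hne ⊢
    by_cases hf : PySem.Chars.find (s.drop st.toNat) ['\\'] = -1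
    · simp [hf] at hne
    · have := PySem.Chars.neg_one_le_find (s.drop st.toNat) ['\\']
      rw [if_neg hf] at hne ⊢
      omega
  · exact absurd (pv_findFrom_past s st (by omega)) hne

theorem pv_drop_shift (p t : List Char) (c : Char) (m : Nat) :
    (p ++ c :: t).drop (p.length + m + 1) = t.drop m := by
  rw [List.drop_append]
  rw [List.drop_eq_nil_of_le (by omega)]
  rw [show p.length + m + 1 - p.length = m + 1 by omega]
  simp

-- the crux: the greedy kept-suffix of the parts is exactly the slice after B's found cut
theorem pv_M (L : Int) : ∀ (parts : List (List Char)), parts ≠ [] →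
    (∀ p ∈ parts, '\\' ∉ p) → L - 3 < pvCost parts →
    PySem.Chars.join ['\\'] ((pvGreedyLoop (L - 3) parts.reverse []).reverse)
      = pvBTail (PySem.Chars.join ['\\'] parts) L := by
  intro parts
  induction parts with
  | nil => intro h; exact absurd rfl h
  | cons p rest ih =>
    intro _ hfree hcost
    have hp : '\\' ∉ p := hfree p (by simp)
    have hcost' : pvCost (p :: rest) = ((p.length : Int) + 1) + pvCost rest := by simp [pvCost]
    cases rest with
    | nil =>
      rw [show (([p] : List (List Char)).reverse) = [p] by simp]
      simp only [pvGreedyLoop]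
      rw [if_pos (by rw [hcost', pvCost_nil] at hcost; omega)]
      rw [show (([] : List (List Char)).reverse) = [] by simp, PySem.Chars.join_nil,
        PySem.Chars.join_singleton]
      simp only [pvBTail]
      rw [pv_findFrom_bsfree p _ hp (le_max_right _ _)]
      simp
    | cons q t =>
      have hrne : (q :: t : List (List Char)) ≠ [] := by simp
      have hs' := pvCost_join (q :: t) hrne
      have hsplit : PySem.Chars.join ['\\'] (p :: q :: t)
          = p ++ '\\' :: PySem.Chars.join ['\\'] (q :: t) := by
        rw [PySem.Chars.join_cons_cons]; simp
      set s' := PySem.Chars.join ['\\'] (q :: t) with hs'def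
      have hrev : (p :: q :: t : List (List Char)).reverse = (q :: t).reverse ++ [p] := by simp
      rw [hrev, hsplit]
      by_cases hc : pvCost (q :: t) ≤ L - 3
      · -- the whole rest fits: greedy keeps exactly `rest`, find hits the first separator
        rw [pvGL_all _ _ _ _ (by rw [pvCost_reverse]; exact hc)]
        simp only [pvGreedyLoop, List.nil_append]
        rw [if_pos (by rw [pvCost_reverse]; omega)]
        rw [List.reverse_reverse]
        simp only [pvBTail]
        have hlen : ((p ++ '\\' :: s').length : Int) = (p.length : Int) + 1 + s'.length := by
          push_cast [List.length_append, List.length_cons, List.length_nil]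
          omega
        have hstart : max (((p ++ '\\' :: s').length : Int) - (L - 3)) 0
            ≤ (p.length : Int) := by
          rw [hlen]; omega
        rw [pv_findFrom_split p s' _ hp (le_max_right _ _) hstart]
        rw [if_neg (by omega)]
        rw [Int.toNat_natCast]
        rw [show p.length + 1 = p.length + 0 + 1 by omega, pv_drop_shift p s' '\\' 0]
        simp
        exact hs'def.symm
      · -- the rest alone is already too long: the head part is irrelevant on both sides
        rw [pvGL_stop _ _ _ _ (by rw [pvCost_reverse]; omega)]
        rw [ih hrne (fun x hx => hfree x (by simp [hx])) (by omega)]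
        simp only [pvBTail]
        have hlen : ((p ++ '\\' :: s').length : Int) = (p.length : Int) + 1 + s'.length := by
          push_cast [List.length_append, List.length_cons, List.length_nil]
          omega
        have hs'3 : L - 3 ≤ (s'.length : Int) := by omega
        have hstart1 : max (((p ++ '\\' :: s').length : Int) - (L - 3)) 0
            = ((p ++ '\\' :: s').length : Int) - (L - 3) := max_eq_left (by rw [hlen]; omega)
        have hstart2 : max ((s'.length : Int) - (L - 3)) 0
            = (s'.length : Int) - (L - 3) := max_eq_left (by omega)
        rw [hstart1, hstart2]
        have hshift := pv_findFrom_shift p s' (((p ++ '\\' :: s').length : Int) - (L - 3))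
          (by rw [hlen]; omega)
        rw [show ((p ++ '\\' :: s').length : Int) - (L - 3) - ((p.length : Int) + 1)
            = (s'.length : Int) - (L - 3) by rw [hlen]; omega] at hshift
        rw [hshift]
        set cut' := PySem.Chars.findFrom s' ['\\'] ((s'.length : Int) - (L - 3)) with hcut'
        by_cases hf : cut' = -1
        · simp [hf]
        · have hnn : 0 ≤ cut' := pv_findFrom_nonneg s' _ (by omega) hf
          simp only [if_neg hf]
          rw [if_neg (show ¬(cut' + ((p.length : Int) + 1) = -1) by omega)]
          have htn : (cut' + ((p.length : Int) + 1)).toNat = cut'.toNat + p.length + 1 := by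
            omega
          rw [htn]
          rw [show cut'.toNat + p.length + 1 + 1 = p.length + cut'.toNat + 1 + 1 by omega]
          rw [show p.length + cut'.toNat + 1 + 1 = p.length + (cut'.toNat + 1) + 1 by omega]
          rw [pv_drop_shift p s' '\\' (cut'.toNat + 1)]

-- ===== VERDICT (by name: the statement is the Claim_ definition above) =====
theorem strip_dir_string_to_max_length_spec : Claim_equal_strip_dir_string_to_max_length := by
  intro ds L _
  unfold Spec_strip_dir_string_to_max_length
  unfold strip_dir_string_to_max_length strip_dir_string_to_max_length_alt
  by_cases h : ((PySem.Str.len ds : Int)) ≤ L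
  · rw [if_pos h, if_pos h]
  · rw [if_neg h, if_neg h]
    simp only [PySem.Str.len_eq] at h ⊢
    set cs := ds.toList with hcs
    have hne := pvSplit_ne_nil cs
    have hcost : L - 3 < pvCost (pvSplit cs) := by
      rw [pvCost_join _ hne, pv_join_pvSplit cs]
      omega
    have hmain := pv_main L (pvSplit cs).reverse []
    simp only [List.reverse_reverse, pvCost_nil, sub_zero] at hmain
    have h0 : pvFlat ([] : List (List Char)) = [] := rfl
    rw [h0] at hmain
    rw [pv_splitOn_eq cs, hmain, PySem.List.slice_to_neg_one]
    unfold pvFlat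
    rw [pv_dropLast_join]
    rw [pv_M L (pvSplit cs) hne (pv_pvSplit_free cs) hcost]
    rw [pv_join_pvSplit cs]
    simp only [pvBTail]
    set start : Int := max ((cs.length : Int) - (L - 3)) 0 with hstart
    set cut := PySem.Chars.findFrom cs ['\\'] start with hcut
    by_cases hf : cut = -1
    · rw [if_pos hf, if_pos hf]
      rfl
    · have hnn : 0 ≤ cut := pv_findFrom_nonneg cs start (le_max_right _ _) hf
      rw [if_neg hf, if_neg hf]
      rw [PySem.List.slice_from cs (by omega : (0:Int) ≤ cut + 1)]
      rw [show (cut + 1).toNat = cut.toNat + 1 by omega]
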